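-- pv_equiv track=rewrite | github.com/VivianePons/zeta_areaseq | areaseq_zeta.py | admissible_insertion_positions
-- ===== SOURCE A (Python) =====
-- def last_position(seq):
--     amax = -1
--     imax = -1
--     inline = False
--
--     #finding the last entry
--     #it is one with maximal area
--     #and on the left end of the right most group with this value
--     for i in range(len(seq)-1,-1,-1):
--         n = seq[i]
--         if n == amax and inline:
--             imax = i
--         elif n > amax:
--             amax = n
--             imax = i
--             inline = True
--         else:
--             inline = False
--
--     return imax
--
-- def admissible_insertion_positions(seq):
--
--     if len(seq)==0:
--         yield 0
--         return
--
--     imax = last_position(seq)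
--     amax = seq[imax]
--
--     # the inserts right after the max areas
--     for i in range(len(seq)-1,-1,-1):
--         n = seq[i]
--         if n == amax:
--             yield i+1
--     # the inserts right after the max-1 areas on the right
--     for i in range(len(seq)-1,imax,-1):
--         n = seq[i]
--         if n == amax-1:
--             yield i+1
--     #the last insert, always at imax
--     yield imax
-- ===== SOURCE B (Python) =====
-- def admissible_insertion_positions(seq):
--     # Single right-to-left online pass: maintain (amax, imax, firsts, seconds)
--     # for the suffix seen so far; a new maximum n == amax+1 promotes the
--     # collected max-positions to the (max-1) list. No pre-pass, no re-scans.
--     if len(seq) == 0: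
--         yield 0
--         return
--     amax = seq[-1]
--     imax = len(seq) - 1
--     firsts = [len(seq)]
--     seconds = []
--     for i in range(len(seq) - 2, -1, -1):
--         n = seq[i]
--         if n > amax:
--             seconds = firsts if n == amax + 1 else []
--             firsts = [i + 1]
--             amax = n
--             imax = i
--         elif n == amax:
--             firsts.append(i + 1)
--             if imax == i + 1:
--                 imax = i
--     yield from firsts
--     yield from seconds
--     yield imax
-- ===== Notes on version B (the rewrite author's own statement) =====
-- stated objective: alternative
-- what changed: Replaces A's three staged passes (a sentinel state-machine pre-pass for imax, then two separate backward emission scans) by ONE online right-to-left pass that maintains (amax, imax, firsts, seconds) simultaneously, promoting the collected max-position list to the (max-1) list whenever a new maximum exceeding the old by exactly 1 appears; the output lists are never re-scanned from the sequence.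
-- intended difference: On nonempty sequences whose entries are all negative, A's -1 sentinels in last_position never update, so A yields positions relative to amax = seq[-1] and ends with the bogus position -1, while B tracks the true maximum and ends with the real start index (>= 0) of its rightmost run, which is the intended behaviour for an area sequence. — e.g. on admissible_insertion_positions([-1]): A returns [1, -1], B returns [1, 0]
import Mathlib
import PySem

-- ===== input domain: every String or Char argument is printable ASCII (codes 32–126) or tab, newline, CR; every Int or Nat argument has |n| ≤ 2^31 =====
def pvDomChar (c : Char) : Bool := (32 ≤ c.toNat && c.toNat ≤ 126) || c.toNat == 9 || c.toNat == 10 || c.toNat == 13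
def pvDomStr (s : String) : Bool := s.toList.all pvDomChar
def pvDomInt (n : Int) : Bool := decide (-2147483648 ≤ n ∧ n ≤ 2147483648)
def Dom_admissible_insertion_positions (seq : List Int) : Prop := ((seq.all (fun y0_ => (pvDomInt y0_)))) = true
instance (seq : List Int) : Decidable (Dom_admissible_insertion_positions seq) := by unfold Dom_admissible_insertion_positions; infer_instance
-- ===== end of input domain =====

-- B replaces A's three staged passes (sentinel state-machine pre-pass, then two emission scans)
-- by ONE online right-to-left pass maintaining (amax, imax, firsts, seconds) with promotion of the
-- max-position list on a new max (objective: alternative); on all-negative input A's -1 sentinels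
-- leak into the output and B returns the intended positions (see D_ below).


-- ===== PORT A =====
-- the body of A's state-machine loop in last_position
def lpStep (seq : List Int) (st : Int × Int × Bool) (i : Int) : Int × Int × Bool :=
  let n := PySem.List.pyGetD seq i 0
  if n = st.1 ∧ st.2.2 then (st.1, i, st.2.2)
  else if n > st.1 then (n, i, true)
  else (st.1, st.2.1, false)

def last_position (seq : List Int) : Int :=
  ((PySem.List.pyRange ((seq.length : Int) - 1) (-1) (-1)).foldl (lpStep seq) (-1, -1, false)).2.1

def admissible_insertion_positions (seq : List Int) : List Int :=
  if seq.length = 0 then [0]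
  else
    let imax := last_position seq
    let amax := PySem.List.pyGetD seq imax 0
    let l1 := (PySem.List.pyRange ((seq.length : Int) - 1) (-1) (-1)).foldl
      (fun acc i => if PySem.List.pyGetD seq i 0 = amax then acc ++ [i + 1] else acc) []
    let l2 := (PySem.List.pyRange ((seq.length : Int) - 1) imax (-1)).foldl
      (fun acc i => if PySem.List.pyGetD seq i 0 = amax - 1 then acc ++ [i + 1] else acc) []
    l1 ++ l2 ++ [imax]

-- ===== PORT B =====
-- Source B: one right-to-left pass over range(len-2, -1, -1) with state (amax, imax, firsts, seconds)
def admissible_insertion_positions_alt (seq : List Int) : List Int :=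
  if seq.length = 0 then [0]
  else
    let st0 : Int × Int × List Int × List Int :=
      (PySem.List.pyGetD seq (-1) 0, (seq.length : Int) - 1, [(seq.length : Int)], [])
    let st := (PySem.List.pyRange ((seq.length : Int) - 2) (-1) (-1)).foldl
      (fun st i =>
        let n := PySem.List.pyGetD seq i 0
        if n > st.1 then (n, i, [i + 1], if n = st.1 + 1 then st.2.2.1 else [])
        else if n = st.1 then
          (st.1, if st.2.1 = i + 1 then i else st.2.1, st.2.2.1 ++ [i + 1], st.2.2.2)
        else st) st0
    st.2.2.1 ++ st.2.2.2 ++ [st.2.1]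

-- ===== PRECONDITION & SPEC =====
-- On nonempty all-negative sequences A's -1 sentinels in last_position never update: A measures
-- against amax = seq[-1] and ends with the bogus position -1, while B tracks the true maximum and
-- ends with the real start index (≥ 0) of its rightmost run — the intended value.
def D_admissible_insertion_positions (seq : List Int) : Prop := seq ≠ [] ∧ ∀ x ∈ seq, x < 0
instance (seq : List Int) : Decidable (D_admissible_insertion_positions seq) := by
  unfold D_admissible_insertion_positions; infer_instance

def Spec_admissible_insertion_positions (seq : List Int) (out : List Int) : Prop :=
  ¬ D_admissible_insertion_positions seq → out = admissible_insertion_positions_alt seq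
instance (seq : List Int) (out : List Int) : Decidable (Spec_admissible_insertion_positions seq out) := by
  unfold Spec_admissible_insertion_positions; infer_instance

def pvDiffWitness_admissible_insertion_positions : List Int := [-1]
def pvDiffWitnessOut_admissible_insertion_positions : (List Int) × (List Int) := ([1, -1], [1, 0])

-- ===== CLAIM (what is proved, stated in full; the proofs are below) =====
def Claim_unchanged_admissible_insertion_positions : Prop := ∀ (seq : List Int), Dom_admissible_insertion_positions seq → Spec_admissible_insertion_positions seq (admissible_insertion_positions seq)
def Claim_changed_admissible_insertion_positions : Prop := Dom_admissible_insertion_positions (pvDiffWitness_admissible_insertion_positions) ∧ D_admissible_insertion_positions (pvDiffWitness_admissible_insertion_positions) ∧ admissible_insertion_positions (pvDiffWitness_admissible_insertion_positions) = pvDiffWitnessOut_admissible_insertion_positions.1 ∧ admissible_insertion_positions_alt (pvDiffWitness_admissible_insertion_positions) = pvDiffWitnessOut_admissible_insertion_positions.2 ∧ pvDiffWitnessOut_admissible_insertion_positions.1 ≠ pvDiffWitnessOut_admissible_insertion_positions.2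
def Claim_exact_admissible_insertion_positions : Prop := ∀ (seq : List Int), Dom_admissible_insertion_positions seq → D_admissible_insertion_positions seq → admissible_insertion_positions seq ≠ admissible_insertion_positions_alt seq

-- ===== LEMMAS AND PROOFS =====

-- A's state-machine step, on (index, value) pairs
def stepP (st : Int × Int × Bool) (p : Int × Int) : Int × Int × Bool :=
  if p.2 = st.1 ∧ st.2.2 then (st.1, p.1, st.2.2)
  else if p.2 > st.1 then (p.2, p.1, true)
  else (st.1, st.2.1, false)

-- A's backward loop as a foldr over the enumeration
def Astate (l : List Int) (s : Int) : Int × Int × Bool :=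
  (PySem.List.enumerate l s).foldr (fun p st => stepP st p) (-1, -1, false)

theorem Astate_cons (x : Int) (t : List Int) (s : Int) :
    Astate (x :: t) s = stepP (Astate t (s + 1)) (s, x) := by
  unfold Astate
  rw [PySem.List.enumerate_cons]
  rfl

theorem lp_eq_Astate (seq : List Int) :
    (PySem.List.pyRange ((seq.length : Int) - 1) (-1) (-1)).foldl (lpStep seq) (-1, -1, false)
      = Astate seq 0 := by
  have h1 : PySem.List.pyRange ((seq.length : Int) - 1) (-1) (-1)
      = (PySem.List.pyRange 0 (seq.length : Int)).reverse := by
    rw [PySem.List.pyRange_neg_one_eq_reverse]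
    norm_num
  rw [h1, List.foldl_reverse]
  unfold Astate
  rw [PySem.List.enumerate_eq_map_pyRange seq 0, List.foldr_map]
  simp only [PySem.List.len_eq]
  rfl

theorem stepP_fst (st : Int × Int × Bool) (p : Int × Int) : (stepP st p).1 = max p.2 st.1 := by
  unfold stepP
  split_ifs with h1 h2 <;> simp <;> omega

theorem Astate_fst (l : List Int) : ∀ s, (Astate l s).1 = l.foldr max (-1) := by
  induction l with
  | nil => intro s; rfl
  | cons x t ih =>
    intro s
    rw [Astate_cons, stepP_fst, List.foldr_cons, ih]

theorem Astate_allneg (l : List Int) (hneg : ∀ y ∈ l, y < 0) : ∀ s, Astate l s = (-1, -1, false) := by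
  induction l with
  | nil => intro s; rfl
  | cons x t ih =>
    intro s
    rw [Astate_cons, ih (fun y hy => hneg y (List.mem_cons_of_mem x hy))]
    have hx : x < 0 := hneg x List.mem_cons_self
    unfold stepP
    split_ifs with h1 h2 <;> simp_all <;> omega

theorem foldr_max_neg (l : List Int) (hneg : ∀ y ∈ l, y < 0) : l.foldr max (-1) < 0 := by
  induction l with
  | nil => simp
  | cons x t ih =>
    have := hneg x List.mem_cons_self
    have := ih (fun y hy => hneg y (List.mem_cons_of_mem x hy))
    simp only [List.foldr_cons]
    omega

theorem le_foldr_max (l : List Int) : ∀ x ∈ l, x ≤ l.foldr max (-1) := by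
  induction l with
  | nil => simp
  | cons y t ih =>
    intro x hx
    rcases List.mem_cons.mp hx with h | h
    · simp [h]
    · simp only [List.foldr_cons, le_max_iff]
      exact Or.inr (ih x h)

-- the invariant of A's state machine when some entry is nonnegative
theorem Astate_pos (l : List Int) (hpos : ∃ x ∈ l, 0 ≤ x) : ∀ s,
    ∃ k : Nat, k < l.length ∧
      (Astate l s).2.1 = s + (k : Int) ∧
      ((Astate l s).2.2 = true ↔ k = 0) ∧
      l[k]! = l.foldr max (-1) ∧
      (k = 0 ∨ l[k - 1]! ≠ l.foldr max (-1)) ∧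
      (∀ j : Nat, k ≤ j → j < l.length → l[j]! = l.foldr max (-1) →
        ∀ u : Nat, k ≤ u → u ≤ j → l[u]! = l.foldr max (-1)) := by
  induction l with
  | nil => simp at hpos
  | cons x t ih =>
    intro s
    by_cases ht : ∃ y ∈ t, 0 ≤ y
    · -- the tail has a nonnegative entry: use the IH
      obtain ⟨k, hk, hm, hinl, hval, hstart, hright⟩ := ih ht (s + 1)
      have hM0 : (0:Int) ≤ t.foldr max (-1) := by
        obtain ⟨y, hy, hy0⟩ := ht
        exact le_trans hy0 (le_foldr_max t y hy)
      have hle : ∀ y ∈ t, y ≤ t.foldr max (-1) := le_foldr_max t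
      rw [Astate_cons]
      by_cases hx : x = (Astate t (s+1)).1 ∧ (Astate t (s+1)).2.2
      · -- run continues: new start at index 0
        have hx1 : x = t.foldr max (-1) := by rw [hx.1, Astate_fst]
        have hfold : (x :: t).foldr max (-1) = t.foldr max (-1) := by
          simp only [List.foldr_cons]; omega
        refine ⟨0, by simp, ?_, ?_, ?_, Or.inl rfl, ?_⟩
        · unfold stepP; rw [if_pos hx]; simp
        · unfold stepP; rw [if_pos hx]; simp [hx.2]
        · simpa [hfold] using hx1
        · -- rightmostness
          have hk0 : k = 0 := hinl.mp hx.2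
          intro j _ hj hjv u _ hu
          rcases Nat.eq_zero_or_pos u with hu0 | hu0
          · simpa [hu0, hfold] using hx1
          · obtain ⟨u', rfl⟩ := Nat.exists_eq_succ_of_ne_zero (Nat.pos_iff_ne_zero.mp hu0)
            rcases Nat.eq_zero_or_pos j with hj0 | hj0
            · omega
            · obtain ⟨j', rfl⟩ := Nat.exists_eq_succ_of_ne_zero (Nat.pos_iff_ne_zero.mp hj0)
              have := hright j' (by omega) (by simpa using hj)
                (by simpa [hfold] using hjv) u' (by omega) (by omega)
              simpa [hfold] using this
      · by_cases hx2 : x > (Astate t (s+1)).1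
        · -- new strict maximum at index 0
          have hx1 : x > t.foldr max (-1) := by rwa [Astate_fst] at hx2
          have hfold : (x :: t).foldr max (-1) = x := by
            simp only [List.foldr_cons]; omega
          refine ⟨0, by simp, ?_, ?_, by simp [hfold], Or.inl rfl, ?_⟩
          · unfold stepP; rw [if_neg hx, if_pos hx2]; simp
          · unfold stepP; rw [if_neg hx, if_pos hx2]; simp
          · intro j _ hj hjv u _ hu
            rcases Nat.eq_zero_or_pos u with hu0 | hu0
            · simp [hu0, hfold]
            · obtain ⟨u', rfl⟩ := Nat.exists_eq_succ_of_ne_zero (Nat.pos_iff_ne_zero.mp hu0)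
              rcases Nat.eq_zero_or_pos j with hj0 | hj0
              · omega
              · obtain ⟨j', rfl⟩ := Nat.exists_eq_succ_of_ne_zero (Nat.pos_iff_ne_zero.mp hj0)
                exfalso
                have hjm : t[j']! ∈ t := by
                  have : j' < t.length := by simpa using hj
                  rw [getElem!_pos t j' this]; exact List.getElem_mem this
                have := hle _ hjm
                rw [List.getElem!_cons_succ, hfold] at hjv
                omega
        · -- x does not extend nor beat the maximum: shift the IH start by one
          have hx3 : x ≤ t.foldr max (-1) := by
            rw [← Astate_fst t (s+1)]; omega
          have hfold : (x :: t).foldr max (-1) = t.foldr max (-1) := by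
            simp only [List.foldr_cons]; omega
          refine ⟨k + 1, by simpa using hk, ?_, ?_, ?_, ?_, ?_⟩
          · unfold stepP; rw [if_neg hx, if_neg hx2]
            simp only [hm]; push_cast; ring
          · unfold stepP; rw [if_neg hx, if_neg hx2]; simp
          · simpa [hfold, List.getElem!_cons_succ] using hval
          · right
            rcases Nat.eq_zero_or_pos k with hk0 | hk0
            · -- k = 0: then inl was true, so x ≠ max
              have hinl' : (Astate t (s+1)).2.2 = true := hinl.mpr hk0
              have hxne : x ≠ (Astate t (s+1)).1 := fun h => hx ⟨h, hinl'⟩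
              rw [Astate_fst] at hxne
              simpa [hk0, hfold] using hxne
            · obtain ⟨k', rfl⟩ := Nat.exists_eq_succ_of_ne_zero (Nat.pos_iff_ne_zero.mp hk0)
              have := hstart.resolve_left (by omega)
              simpa [hfold, List.getElem!_cons_succ] using this
          · intro j hkj hj hjv u hku hu
            obtain ⟨j', rfl⟩ := Nat.exists_eq_succ_of_ne_zero (by omega : j ≠ 0)
            obtain ⟨u', rfl⟩ := Nat.exists_eq_succ_of_ne_zero (by omega : u ≠ 0)
            have := hright j' (by omega) (by simpa using hj)
              (by simpa [hfold] using hjv) u' (by omega) (by omega)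
            simpa [hfold] using this
    · -- all of the tail is negative, so x is the (strict) maximum
      push_neg at ht
      have htneg : ∀ y ∈ t, y < 0 := fun y hy => ht y hy
      have hx0 : 0 ≤ x := by
        obtain ⟨y, hy, hy0⟩ := hpos
        rcases List.mem_cons.mp hy with h | h
        · omega
        · exact absurd hy0 (by have := htneg y h; omega)
      have hMneg := foldr_max_neg t htneg
      have hfold : (x :: t).foldr max (-1) = x := by
        simp only [List.foldr_cons]; omega
      rw [Astate_cons, Astate_allneg t htneg (s + 1)]
      have hstep : stepP (-1, -1, false) (s, x) = (x, s, true) := by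
        unfold stepP
        split_ifs with h1 h2 <;> simp_all <;> omega
      rw [hstep]
      refine ⟨0, by simp, by simp, by simp, by simp [hfold], Or.inl rfl, ?_⟩
      intro j _ hj hjv u _ hu
      rcases Nat.eq_zero_or_pos u with hu0 | hu0
      · simp [hu0, hfold]
      · obtain ⟨u', rfl⟩ := Nat.exists_eq_succ_of_ne_zero (Nat.pos_iff_ne_zero.mp hu0)
        rcases Nat.eq_zero_or_pos j with hj0 | hj0
        · omega
        · obtain ⟨j', rfl⟩ := Nat.exists_eq_succ_of_ne_zero (Nat.pos_iff_ne_zero.mp hj0)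
          exfalso
          have hjm : t[j']! ∈ t := by
            have : j' < t.length := by simpa using hj
            rw [getElem!_pos t j' this]; exact List.getElem_mem this
          have := htneg _ hjm
          rw [List.getElem!_cons_succ, hfold] at hjv
          omega

-- a comprehension with a filter clause, as filter-then-map
theorem filterMap_ite {α β : Type} (c : α → Prop) [DecidablePred c] (g : α → β) (l : List α) :
    l.filterMap (fun x => if c x then some (g x) else none)
      = (l.filter (fun x => decide (c x))).map g := by
  induction l with
  | nil => rfl
  | cons x t ih =>
    by_cases h : c x <;> simp [h, ih]

theorem range_rev (seq : List Int) :
    PySem.List.pyRange ((seq.length : Int) - 1) (-1) (-1)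
      = (PySem.List.pyRange 0 (seq.length : Int)).reverse := by
  rw [PySem.List.pyRange_neg_one_eq_reverse]
  norm_num

-- A's first emission loop = reverse of the max-position comprehension
theorem loop1_eq (seq : List Int) (amax : Int) :
    (PySem.List.pyRange ((seq.length : Int) - 1) (-1) (-1)).foldl
      (fun acc i => if PySem.List.pyGetD seq i 0 = amax then acc ++ [i + 1] else acc) []
    = ((PySem.List.enumerate seq).filterMap
        (fun p => if p.2 = amax then some (p.1 + 1) else none)).reverse := by
  rw [range_rev]
  have hfun : (fun (acc : List Int) (i : Int) => if PySem.List.pyGetD seq i 0 = amax then acc ++ [i + 1] else acc)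
      = (fun acc i => if (fun j : Int => decide (PySem.List.pyGetD seq j 0 = amax)) i = true
          then acc ++ [(fun j : Int => j + 1) i] else acc) := by
    funext acc i; simp
  rw [hfun, PySem.List.foldl_append_if, List.nil_append, List.filter_reverse, List.map_reverse]
  congr 1
  rw [PySem.List.enumerate_eq_map_pyRange seq 0, List.filterMap_map]
  simp only [PySem.List.len_eq]
  have : ((fun p : Int × Int => if p.2 = amax then some (p.1 + 1) else none) ∘
      (fun j : Int => (j, PySem.List.pyGetD seq j 0)))
      = (fun j : Int => if PySem.List.pyGetD seq j 0 = amax then some (j + 1) else none) := by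
    funext j; rfl
  rw [this, filterMap_ite (fun j : Int => PySem.List.pyGetD seq j 0 = amax) (fun j : Int => j + 1)]

-- A's second emission loop = reverse of the (max-1)-position comprehension
theorem loop2_eq (seq : List Int) (amax : Int) (k : Nat) (hk : k < seq.length) :
    (PySem.List.pyRange ((seq.length : Int) - 1) (k : Int) (-1)).foldl
      (fun acc i => if PySem.List.pyGetD seq i 0 = amax - 1 then acc ++ [i + 1] else acc) []
    = ((PySem.List.enumerate seq).filterMap
        (fun p => if p.1 > (k : Int) ∧ p.2 = amax - 1 then some (p.1 + 1) else none)).reverse := by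
  have hrange : PySem.List.pyRange ((seq.length : Int) - 1) (k : Int) (-1)
      = (PySem.List.pyRange ((k : Int) + 1) (seq.length : Int)).reverse := by
    rw [PySem.List.pyRange_neg_one_eq_reverse]
    norm_num
  rw [hrange]
  have hfun : (fun (acc : List Int) (i : Int) => if PySem.List.pyGetD seq i 0 = amax - 1 then acc ++ [i + 1] else acc)
      = (fun acc i => if (fun j : Int => decide (PySem.List.pyGetD seq j 0 = amax - 1)) i = true
          then acc ++ [(fun j : Int => j + 1) i] else acc) := by
    funext acc i; simp
  rw [hfun, PySem.List.foldl_append_if, List.nil_append, List.filter_reverse, List.map_reverse]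
  congr 1
  rw [PySem.List.enumerate_eq_map_pyRange seq 0, List.filterMap_map]
  simp only [PySem.List.len_eq]
  have hcomp : ((fun p : Int × Int => if p.1 > (k : Int) ∧ p.2 = amax - 1 then some (p.1 + 1) else none) ∘
      (fun j : Int => (j, PySem.List.pyGetD seq j 0)))
      = (fun j : Int => if j > (k : Int) ∧ PySem.List.pyGetD seq j 0 = amax - 1 then some (j + 1) else none) := by
    funext j; rfl
  rw [hcomp, filterMap_ite (fun j : Int => j > (k : Int) ∧ PySem.List.pyGetD seq j 0 = amax - 1)
    (fun j : Int => j + 1)]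
  rw [PySem.List.pyRange_one_append 0 ((k : Int) + 1) (seq.length : Int) (by omega) (by exact_mod_cast hk),
    List.filter_append]
  have h1 : (PySem.List.pyRange 0 ((k : Int) + 1)).filter
      (fun j : Int => decide (j > (k : Int) ∧ PySem.List.pyGetD seq j 0 = amax - 1)) = [] := by
    rw [List.filter_eq_nil_iff]
    intro j hj
    have := PySem.List.mem_pyRange_one.mp hj
    simp only [decide_eq_true_eq, not_and]
    intro h
    omega
  have h2 : (PySem.List.pyRange ((k : Int) + 1) (seq.length : Int)).filter
      (fun j : Int => decide (j > (k : Int) ∧ PySem.List.pyGetD seq j 0 = amax - 1))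
      = (PySem.List.pyRange ((k : Int) + 1) (seq.length : Int)).filter
        (fun j : Int => decide (PySem.List.pyGetD seq j 0 = amax - 1)) := by
    apply List.filter_congr
    intro j hj
    have := PySem.List.mem_pyRange_one.mp hj
    have hjk : ((k : Int) < j) := by omega
    simp [hjk]
  rw [h1, h2, List.nil_append]

-- ===== B-side machinery =====

-- B's loop body on (index, value) pairs
def bstepP (st : Int × Int × List Int × List Int) (p : Int × Int) : Int × Int × List Int × List Int :=
  if p.2 > st.1 then (p.2, p.1, [p.1 + 1], if p.2 = st.1 + 1 then st.2.2.1 else [])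
  else if p.2 = st.1 then
    (st.1, if st.2.1 = p.1 + 1 then p.1 else st.2.1, st.2.2.1 ++ [p.1 + 1], st.2.2.2)
  else st

-- B's loop, run right-to-left over the suffix starting at offset s
def Bst : List Int → Int → Int × Int × List Int × List Int
  | [], s => (0, s, [], [])
  | [x], s => (x, s, [s + 1], [])
  | x :: y :: t, s => bstepP (Bst (y :: t) (s + 1)) (s, x)

-- true maximum of a nonempty list
def tmax : List Int → Int
  | [] => 0
  | [x] => x
  | x :: y :: t => max x (tmax (y :: t))

theorem le_tmax (l : List Int) : ∀ x ∈ l, x ≤ tmax l := by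
  induction l with
  | nil => simp
  | cons x t ih =>
    cases t with
    | nil => intro z hz; simp_all [tmax]
    | cons y t' =>
      intro z hz
      rcases List.mem_cons.mp hz with h | h
      · simp [tmax, h]
      · have := ih z h
        simp only [tmax, le_max_iff]
        exact Or.inr this

theorem foldr_eq_max_tmax (l : List Int) (hl : l ≠ []) :
    l.foldr max (-1) = max (tmax l) (-1) := by
  induction l with
  | nil => simp at hl
  | cons x t ih =>
    cases t with
    | nil => simp [tmax]
    | cons y t' =>
      simp only [List.foldr_cons] at ih ⊢
      rw [ih (by simp)]
      simp only [tmax]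
      omega

theorem tmax_eq_foldr (l : List Int) (hl : l ≠ []) (h0 : ∃ x ∈ l, 0 ≤ x) :
    tmax l = l.foldr max (-1) := by
  obtain ⟨x, hx, hx0⟩ := h0
  have := le_tmax l x hx
  rw [foldr_eq_max_tmax l hl]
  omega

-- foldr congruence over members
theorem foldr_congr_mem {α β : Type} (l : List α) (f g : α → β → β) (b : β)
    (h : ∀ x ∈ l, ∀ st, f x st = g x st) : l.foldr f b = l.foldr g b := by
  induction l with
  | nil => rfl
  | cons x t ih =>
    simp only [List.foldr_cons]
    rw [ih (fun z hz => h z (List.mem_cons_of_mem x hz)), h x List.mem_cons_self]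

-- Bst as a foldr over the enumeration of the dropLast prefix
theorem Bst_eq_foldr_enum (l : List Int) : l ≠ [] → ∀ s : Int,
    (PySem.List.enumerate l.dropLast s).foldr (fun p st => bstepP st p)
      (l[l.length - 1]!, s + (l.length : Int) - 1, [s + (l.length : Int)], []) = Bst l s := by
  induction l with
  | nil => intro h; exact absurd rfl h
  | cons x t ih =>
    intro _ s
    cases t with
    | nil =>
      simp [PySem.List.enumerate_nil, Bst]
    | cons y t' =>
      rw [List.dropLast_cons₂, PySem.List.enumerate_cons, List.foldr_cons]
      rw [show ((x :: y :: t')[(x :: y :: t').length - 1]! : Int)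
            = (y :: t')[(y :: t').length - 1]! from by
          show (x :: y :: t')[t'.length + 1]! = (y :: t')[t'.length]!
          rw [List.getElem!_cons_succ],
        show s + ((x :: y :: t').length : Int) - 1 = (s + 1) + ((y :: t').length : Int) - 1 from by
          simp only [List.length_cons]; push_cast; ring,
        show s + ((x :: y :: t').length : Int) = (s + 1) + ((y :: t').length : Int) from by
          simp only [List.length_cons]; push_cast; ring]
      rw [ih (by simp) (s + 1)]
      rfl

-- B's port fold equals the structural recursion Bst
theorem alt_fold_eq_Bst (seq : List Int) (hne : seq ≠ []) :
    (PySem.List.pyRange ((seq.length : Int) - 2) (-1) (-1)).foldl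
      (fun st i =>
        let n := PySem.List.pyGetD seq i 0
        if n > st.1 then (n, i, [i + 1], if n = st.1 + 1 then st.2.2.1 else [])
        else if n = st.1 then
          (st.1, if st.2.1 = i + 1 then i else st.2.1, st.2.2.1 ++ [i + 1], st.2.2.2)
        else st)
      (PySem.List.pyGetD seq (-1) 0, (seq.length : Int) - 1, [(seq.length : Int)], [])
    = Bst seq 0 := by
  have hlen : 0 < seq.length := List.length_pos_iff.mpr hne
  have hr : PySem.List.pyRange ((seq.length : Int) - 2) (-1) (-1)
      = (PySem.List.pyRange 0 ((seq.length : Int) - 1)).reverse := by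
    rw [PySem.List.pyRange_neg_one_eq_reverse,
      show ((-1:Int) + 1) = (0:Int) from by norm_num,
      show (seq.length : Int) - 2 + 1 = (seq.length : Int) - 1 from by ring]
  rw [hr, List.foldl_reverse, ← Bst_eq_foldr_enum seq hne 0]
  have hdl : ((seq.dropLast.length : Nat) : Int) = (seq.length : Int) - 1 := by
    rw [List.length_dropLast]; omega
  rw [PySem.List.enumerate_eq_map_pyRange seq.dropLast 0, List.foldr_map]
  simp only [PySem.List.len_eq, hdl]
  have hget : PySem.List.pyGetD seq (-1) 0 = seq[seq.length - 1]! := by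
    have h1 := PySem.List.pyGetD_neg_natCast (xs := seq) (d := (0:Int)) (k := 1)
      (by omega) (by omega)
    rw [show -(((1:Nat)) : Int) = (-1 : Int) from by norm_num] at h1
    rw [h1, getElem!_pos seq (seq.length - 1) (by omega)]
  rw [show (0:Int) + (seq.length : Int) - 1 = (seq.length : Int) - 1 from by ring,
      show (0:Int) + (seq.length : Int) = (seq.length : Int) from by ring, ← hget]
  apply foldr_congr_mem
  intro j hj st
  have hjr := PySem.List.mem_pyRange_one.mp hj
  have hgj : PySem.List.pyGetD seq.dropLast j 0 = PySem.List.pyGetD seq j 0 := by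
    rw [PySem.List.pyGetD_eq_getElem seq.dropLast 0 (by omega)
        (by rw [hdl]; omega),
      PySem.List.pyGetD_eq_getElem seq 0 (by omega) (by omega),
      List.getElem_dropLast]
  rw [hgj]
  rfl

-- small helpers for the invariant proof
theorem filterMap_congr_mem {α β : Type} (l : List α) (f g : α → Option β)
    (h : ∀ x ∈ l, f x = g x) : l.filterMap f = l.filterMap g := by
  induction l with
  | nil => rfl
  | cons x t ih =>
    simp only [List.filterMap_cons, h x List.mem_cons_self,
      ih (fun z hz => h z (List.mem_cons_of_mem x hz))]

theorem enum_snd_mem {m : List Int} {s : Int} {p : Int × Int}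
    (hp : p ∈ PySem.List.enumerate m s) : p.2 ∈ m := by
  have := List.mem_map_of_mem (f := fun q : Int × Int => q.2) hp
  rwa [PySem.List.map_snd_enumerate] at this

theorem getElem!_mem_list (m : List Int) (j : Nat) (hj : j < m.length) : m[j]! ∈ m := by
  rw [getElem!_pos m j hj]; exact List.getElem_mem hj

theorem fm_none_of_gt (m : List Int) (s v : Int) (hv : ∀ z ∈ m, z < v) :
    (PySem.List.enumerate m s).filterMap
      (fun p => if p.2 = v then some (p.1 + 1) else none) = [] := by
  rw [List.filterMap_eq_nil_iff]
  intro p hp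
  have := hv _ (enum_snd_mem hp)
  rw [if_neg (by omega)]

theorem fm2_none_of_gt (m : List Int) (s c v : Int) (hv : ∀ z ∈ m, z < v) :
    (PySem.List.enumerate m s).filterMap
      (fun p => if p.1 > c ∧ p.2 = v then some (p.1 + 1) else none) = [] := by
  rw [List.filterMap_eq_nil_iff]
  intro p hp
  have := hv _ (enum_snd_mem hp)
  rw [if_neg (fun hh => by have := hh.2; omega)]

theorem fm2_drop_fst (m : List Int) (s c v : Int) (hc : c < s) :
    (PySem.List.enumerate m s).filterMap
      (fun p => if p.1 > c ∧ p.2 = v then some (p.1 + 1) else none)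
    = (PySem.List.enumerate m s).filterMap
      (fun p => if p.2 = v then some (p.1 + 1) else none) := by
  apply filterMap_congr_mem
  intro p hp
  obtain ⟨kk, hkk, rfl⟩ := (PySem.List.mem_enumerate_iff _ _ _).mp hp
  have h1 : c < s + (kk : Int) := by have := Int.natCast_nonneg kk; omega
  by_cases h2 : (m[kk]'hkk) = v
  · rw [if_pos ⟨h1, h2⟩, if_pos h2]
  · rw [if_neg (fun hh => h2 hh.2), if_neg h2]

theorem fm2_shift (m : List Int) (s v : Int) (h0 : m[0]! ≠ v) :
    (PySem.List.enumerate m (s + 1)).filterMap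
      (fun p => if p.1 > s ∧ p.2 = v then some (p.1 + 1) else none)
    = (PySem.List.enumerate m (s + 1)).filterMap
      (fun p => if p.1 > s + 1 ∧ p.2 = v then some (p.1 + 1) else none) := by
  apply filterMap_congr_mem
  intro p hp
  obtain ⟨kk, hkk, rfl⟩ := (PySem.List.mem_enumerate_iff _ _ _).mp hp
  rcases Nat.eq_zero_or_pos kk with h | h
  · subst h
    have hgv : (m[0]'hkk) = m[0]! := (getElem!_pos m 0 hkk).symm
    rw [if_neg (fun hh => h0 (hgv ▸ hh.2)), if_neg (fun hh => h0 (hgv ▸ hh.2))]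
  · have hk1 : (1 : Int) ≤ (kk : Int) := by exact_mod_cast h
    have h1 : s < s + 1 + (kk : Int) := by omega
    have h2 : s + 1 < s + 1 + (kk : Int) := by omega
    by_cases hv : (m[kk]'hkk) = v
    · rw [if_pos ⟨h1, hv⟩, if_pos ⟨h2, hv⟩]
    · rw [if_neg (fun hh => hv hh.2), if_neg (fun hh => hv hh.2)]

theorem bstepP_gt (a b : Int) (f s2 : List Int) (i v : Int) (h : a < v) :
    bstepP (a, b, f, s2) (i, v) = (v, i, [i + 1], if v = a + 1 then f else []) := by
  unfold bstepP
  rw [if_pos h]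

theorem bstepP_eq2 (a b : Int) (f s2 : List Int) (i v : Int) (h : v = a) :
    bstepP (a, b, f, s2) (i, v) = (a, if b = i + 1 then i else b, f ++ [i + 1], s2) := by
  unfold bstepP
  rw [if_neg (by omega : ¬ ((i, v) : Int × Int).2 > a), if_pos h]

theorem bstepP_lt (a b : Int) (f s2 : List Int) (i v : Int) (h : v < a) :
    bstepP (a, b, f, s2) (i, v) = (a, b, f, s2) := by
  unfold bstepP
  rw [if_neg (by omega : ¬ ((i, v) : Int × Int).2 > a),
    if_neg (by omega : ((i, v) : Int × Int).2 ≠ a)]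

-- the invariant of B's single pass
theorem Bst_spec (l : List Int) : l ≠ [] → ∀ s : Int,
    ∃ k : Nat, k < l.length ∧
      Bst l s = (tmax l, s + (k : Int),
        ((PySem.List.enumerate l s).filterMap
          (fun p => if p.2 = tmax l then some (p.1 + 1) else none)).reverse,
        ((PySem.List.enumerate l s).filterMap
          (fun p => if p.1 > s + (k : Int) ∧ p.2 = tmax l - 1 then some (p.1 + 1) else none)).reverse) ∧
      l[k]! = tmax l ∧
      (k = 0 ∨ l[k - 1]! ≠ tmax l) ∧
      (∀ j : Nat, k ≤ j → j < l.length → l[j]! = tmax l →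
        ∀ u : Nat, k ≤ u → u ≤ j → l[u]! = tmax l) := by
  induction l with
  | nil => intro h; exact absurd rfl h
  | cons x t ih =>
    intro _ s
    cases t with
    | nil =>
      refine ⟨0, by simp, ?_, by simp [tmax], Or.inl rfl, ?_⟩
      · show Bst [x] s = _
        rw [PySem.List.enumerate_cons, PySem.List.enumerate_nil]
        simp only [Bst, tmax, List.filterMap_cons, List.filterMap_nil]
        norm_num
      · intro j _ hj _ u _ hu
        simp only [List.length_cons, List.length_nil] at hj
        have : u = 0 := by omega
        simp [this, tmax]
    | cons y t' =>
      obtain ⟨k', hk', hBst, hval, hstart, hright⟩ := ih (by simp) (s + 1)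
      have hle : ∀ z ∈ (y :: t'), z ≤ tmax (y :: t') := le_tmax _
      have htm : tmax (x :: y :: t') = max x (tmax (y :: t')) := rfl
      have hBc : Bst (x :: y :: t') s = bstepP (Bst (y :: t') (s + 1)) (s, x) := rfl
      have henum : PySem.List.enumerate (x :: y :: t') s
          = (s, x) :: PySem.List.enumerate (y :: t') (s + 1) :=
        PySem.List.enumerate_cons x (y :: t') s
      rcases lt_trichotomy (tmax (y :: t')) x with hgt | heq | hlt
      · -- NEW MAXIMUM at the head
        have htm1 : tmax (x :: y :: t') = x := by rw [htm]; exact max_eq_left hgt.le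
        refine ⟨0, by simp, ?_, by simp [htm1], Or.inl rfl, ?_⟩
        · rw [hBc, hBst, henum, htm1, bstepP_gt _ _ _ _ _ _ hgt]
          simp only [Prod.mk.injEq]
          refine ⟨by simp, by simp, ?_, ?_⟩
          · rw [List.filterMap_cons_some
                (f := fun p : Int × Int => if p.2 = x then some (p.1 + 1) else none)
                (a := ((s : Int), x)) (b := s + 1) (by simp),
              fm_none_of_gt (y :: t') (s + 1) x (fun z hz => lt_of_le_of_lt (hle z hz) hgt)]
            rfl
          · rw [show s + ((0 : Nat) : Int) = s from by simp]
            have hnone1 : (fun p : Int × Int =>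
                if p.1 > s ∧ p.2 = x - 1 then some (p.1 + 1) else none) ((s : Int), x) = none :=
              if_neg (by rintro ⟨h1, -⟩; exact lt_irrefl s h1)
            rw [List.filterMap_cons_none
                (f := fun p : Int × Int => if p.1 > s ∧ p.2 = x - 1 then some (p.1 + 1) else none)
                (a := ((s : Int), x)) hnone1]
            by_cases hx1 : x = tmax (y :: t') + 1
            · rw [if_pos hx1, fm2_drop_fst (y :: t') (s + 1) s (x - 1) (by omega),
                show x - 1 = tmax (y :: t') from by omega]
            · rw [if_neg hx1, fm2_none_of_gt (y :: t') (s + 1) s (x - 1)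
                (fun z hz => by have := hle z hz; omega)]
              rfl
        · intro j _ hjlen hjv u _ huj
          rcases Nat.eq_zero_or_pos u with hu0 | hu0
          · simp [hu0, htm1]
          · obtain ⟨j', rfl⟩ : ∃ jj, j = jj + 1 := ⟨j - 1, by omega⟩
            exfalso
            have hjm : (y :: t')[j']! ∈ (y :: t') :=
              getElem!_mem_list _ _ (by simp only [List.length_cons] at hjlen ⊢; omega)
            have := hle _ hjm
            rw [List.getElem!_cons_succ, htm1] at hjv
            omega
      · -- the head equals the running maximum
        have htm2 : tmax (x :: y :: t') = tmax (y :: t') := by rw [htm]; exact max_eq_right heq.ge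
        rcases Nat.eq_zero_or_pos k' with hk0 | hk0
        · subst hk0
          refine ⟨0, by simp, ?_,
            by rw [List.getElem!_cons_zero, htm2]; exact heq.symm, Or.inl rfl, ?_⟩
          · rw [hBc, hBst, henum, htm2, bstepP_eq2 _ _ _ _ _ _ heq.symm,
              if_pos (show s + 1 + ((0 : Nat) : Int) = s + 1 from by simp)]
            simp only [Prod.mk.injEq]
            refine ⟨by simp, by simp, ?_, ?_⟩
            · rw [List.filterMap_cons_some
                  (f := fun p : Int × Int =>
                    if p.2 = tmax (y :: t') then some (p.1 + 1) else none)
                  (a := ((s : Int), x)) (b := s + 1) (by simp [heq]), List.reverse_cons]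
            · rw [show s + ((0 : Nat) : Int) = s from by simp,
                show s + 1 + ((0 : Nat) : Int) = s + 1 from by simp]
              have hnone2 : (fun p : Int × Int =>
                  if p.1 > s ∧ p.2 = tmax (y :: t') - 1 then some (p.1 + 1) else none)
                  ((s : Int), x) = none :=
                if_neg (by rintro ⟨h1, -⟩; exact lt_irrefl s h1)
              rw [List.filterMap_cons_none
                  (f := fun p : Int × Int =>
                    if p.1 > s ∧ p.2 = tmax (y :: t') - 1 then some (p.1 + 1) else none)
                  (a := ((s : Int), x)) hnone2]
              exact congrArg List.reverse
                (fm2_shift (y :: t') s (tmax (y :: t') - 1) (by rw [hval]; omega)).symm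
          · intro j _ hjlen hjv u _ huj
            rcases Nat.eq_zero_or_pos u with hu0 | hu0
            · rw [hu0, List.getElem!_cons_zero, htm2]; exact heq.symm
            · obtain ⟨j', rfl⟩ : ∃ jj, j = jj + 1 := ⟨j - 1, by omega⟩
              obtain ⟨u', rfl⟩ : ∃ uu, u = uu + 1 := ⟨u - 1, by omega⟩
              rw [List.getElem!_cons_succ, htm2] at hjv
              rw [List.getElem!_cons_succ, htm2]
              exact hright j' (by omega) (by simp only [List.length_cons] at hjlen ⊢; omega) hjv
                u' (by omega) (by omega)
        · refine ⟨k' + 1, by simp only [List.length_cons] at hk' ⊢; omega, ?_, ?_, ?_, ?_⟩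
          · rw [hBc, hBst, henum, htm2, bstepP_eq2 _ _ _ _ _ _ heq.symm,
              if_neg (show ¬ (s + 1 + ((k' : Nat) : Int) = s + 1) from by omega)]
            simp only [Prod.mk.injEq]
            refine ⟨by simp, by push_cast; ring, ?_, ?_⟩
            · rw [List.filterMap_cons_some
                  (f := fun p : Int × Int =>
                    if p.2 = tmax (y :: t') then some (p.1 + 1) else none)
                  (a := ((s : Int), x)) (b := s + 1) (by simp [heq]), List.reverse_cons]
            · rw [show s + ((k' + 1 : Nat) : Int) = s + 1 + ((k' : Nat) : Int) from by
                push_cast; ring]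
              have hnone3 : (fun p : Int × Int =>
                  if p.1 > s + 1 + ((k' : Nat) : Int) ∧ p.2 = tmax (y :: t') - 1
                  then some (p.1 + 1) else none) ((s : Int), x) = none :=
                if_neg (by
                  rintro ⟨h1, -⟩
                  have h2 := Int.natCast_nonneg k'
                  have h1' : s > s + 1 + (k' : Int) := h1
                  omega)
              rw [List.filterMap_cons_none
                  (f := fun p : Int × Int =>
                    if p.1 > s + 1 + ((k' : Nat) : Int) ∧ p.2 = tmax (y :: t') - 1
                    then some (p.1 + 1) else none)
                  (a := ((s : Int), x)) hnone3]
          · rw [List.getElem!_cons_succ, htm2]; exact hval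
          · right
            obtain ⟨k'', rfl⟩ : ∃ kk, k' = kk + 1 := ⟨k' - 1, by omega⟩
            have h := hstart.resolve_left (by omega)
            simp only [Nat.add_sub_cancel] at h
            simp only [Nat.add_sub_cancel, List.getElem!_cons_succ, htm2]
            exact h
          · intro j hj1 hjlen hjv u hu1 huj
            obtain ⟨j', rfl⟩ : ∃ jj, j = jj + 1 := ⟨j - 1, by omega⟩
            obtain ⟨u', rfl⟩ : ∃ uu, u = uu + 1 := ⟨u - 1, by omega⟩
            rw [List.getElem!_cons_succ, htm2] at hjv
            rw [List.getElem!_cons_succ, htm2]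
            exact hright j' (by omega) (by simp only [List.length_cons] at hjlen ⊢; omega) hjv
              u' (by omega) (by omega)
      · -- the head is strictly below the running maximum
        have htm2 : tmax (x :: y :: t') = tmax (y :: t') := by rw [htm]; exact max_eq_right hlt.le
        refine ⟨k' + 1, by simp only [List.length_cons] at hk' ⊢; omega, ?_, ?_, ?_, ?_⟩
        · rw [hBc, hBst, henum, htm2, bstepP_lt _ _ _ _ _ _ hlt]
          simp only [Prod.mk.injEq]
          refine ⟨by simp, by push_cast; ring, ?_, ?_⟩
          · have hnone4 : (fun p : Int × Int =>
                if p.2 = tmax (y :: t') then some (p.1 + 1) else none) ((s : Int), x) = none :=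
              if_neg (by omega)
            rw [List.filterMap_cons_none
                (f := fun p : Int × Int =>
                  if p.2 = tmax (y :: t') then some (p.1 + 1) else none)
                (a := ((s : Int), x)) hnone4]
          · rw [show s + ((k' + 1 : Nat) : Int) = s + 1 + ((k' : Nat) : Int) from by
              push_cast; ring]
            have hnone3 : (fun p : Int × Int =>
                if p.1 > s + 1 + ((k' : Nat) : Int) ∧ p.2 = tmax (y :: t') - 1
                then some (p.1 + 1) else none) ((s : Int), x) = none :=
              if_neg (by
                rintro ⟨h1, -⟩
                have h2 := Int.natCast_nonneg k'
                have h1' : s > s + 1 + (k' : Int) := h1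
                omega)
            rw [List.filterMap_cons_none
                (f := fun p : Int × Int =>
                  if p.1 > s + 1 + ((k' : Nat) : Int) ∧ p.2 = tmax (y :: t') - 1
                  then some (p.1 + 1) else none)
                (a := ((s : Int), x)) hnone3]
        · rw [List.getElem!_cons_succ, htm2]; exact hval
        · right
          rcases Nat.eq_zero_or_pos k' with hk0 | hk0
          · subst hk0
            simp only [Nat.add_sub_cancel, List.getElem!_cons_zero, htm2]
            omega
          · obtain ⟨k'', rfl⟩ : ∃ kk, k' = kk + 1 := ⟨k' - 1, by omega⟩
            have h := hstart.resolve_left (by omega)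
            simp only [Nat.add_sub_cancel] at h
            simp only [Nat.add_sub_cancel, List.getElem!_cons_succ, htm2]
            exact h
        · intro j hj1 hjlen hjv u hu1 huj
          obtain ⟨j', rfl⟩ : ∃ jj, j = jj + 1 := ⟨j - 1, by omega⟩
          obtain ⟨u', rfl⟩ : ∃ uu, u = uu + 1 := ⟨u - 1, by omega⟩
          rw [List.getElem!_cons_succ, htm2] at hjv
          rw [List.getElem!_cons_succ, htm2]
          exact hright j' (by omega) (by simp only [List.length_cons] at hjlen ⊢; omega) hjv
            u' (by omega) (by omega)

-- a rightmost maximal run has a unique start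
theorem run_start_unique (l : List Int) (M : Int) (k1 k2 : Nat)
    (h1 : k1 < l.length) (v1 : l[k1]! = M) (s1 : k1 = 0 ∨ l[k1 - 1]! ≠ M)
    (r1 : ∀ j : Nat, k1 ≤ j → j < l.length → l[j]! = M →
      ∀ u : Nat, k1 ≤ u → u ≤ j → l[u]! = M)
    (h2 : k2 < l.length) (v2 : l[k2]! = M) (s2 : k2 = 0 ∨ l[k2 - 1]! ≠ M)
    (r2 : ∀ j : Nat, k2 ≤ j → j < l.length → l[j]! = M →
      ∀ u : Nat, k2 ≤ u → u ≤ j → l[u]! = M) : k1 = k2 := by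
  rcases Nat.lt_trichotomy k1 k2 with h | h | h
  · exfalso
    have : l[k2 - 1]! = M := r1 k2 (by omega) h2 v2 (k2 - 1) (by omega) (by omega)
    exact (s2.resolve_left (by omega)) this
  · exact h
  · exfalso
    have : l[k1 - 1]! = M := r2 k1 (by omega) h1 v1 (k1 - 1) (by omega) (by omega)
    exact (s1.resolve_left (by omega)) this

-- ===== VERDICT (by name: the statement is the Claim_ definition above) =====
theorem admissible_insertion_positions_spec : Claim_unchanged_admissible_insertion_positions := by
  unfold Claim_unchanged_admissible_insertion_positions
  intro seq _hdom
  unfold Spec_admissible_insertion_positions D_admissible_insertion_positions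
  intro hnd
  by_cases hnil : seq = []
  · subst hnil; rfl
  · push_neg at hnd
    obtain ⟨z, hz, hz0⟩ := hnd hnil
    have hpos : ∃ x ∈ seq, 0 ≤ x := ⟨z, hz, by omega⟩
    have htm : tmax seq = seq.foldr max (-1) := tmax_eq_foldr seq hnil hpos
    obtain ⟨kA, hkA, hmA, _, hvalA, hstartA, hrightA⟩ := Astate_pos seq hpos 0
    obtain ⟨kB, hkB, hBt, hvalB, hstartB, hrightB⟩ := Bst_spec seq hnil 0
    rw [htm] at hBt hvalB hstartB hrightB
    have hkk : kA = kB := run_start_unique seq (seq.foldr max (-1)) kA kB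
      hkA hvalA hstartA hrightA hkB hvalB hstartB hrightB
    subst hkk
    have hlen0 : seq.length ≠ 0 := by simpa [List.length_eq_zero_iff] using hnil
    have hmA' : (Astate seq 0).2.1 = (kA : Int) := by rw [hmA]; ring
    have hget : PySem.List.pyGetD seq ((kA : Nat) : Int) 0 = seq.foldr max (-1) := by
      rw [PySem.List.pyGetD_eq_getElem seq 0 (by omega) (by exact_mod_cast hkA)]
      rw [← hvalA, getElem!_pos seq kA hkA]
      simp
    unfold admissible_insertion_positions admissible_insertion_positions_alt last_position
    rw [if_neg hlen0, if_neg hlen0]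
    simp only [lp_eq_Astate, hmA', alt_fold_eq_Bst seq hnil, hBt, hget]
    rw [loop1_eq seq (seq.foldr max (-1)), loop2_eq seq (seq.foldr max (-1)) kA hkA]
    simp only [zero_add]

theorem admissible_insertion_positions_changed : Claim_changed_admissible_insertion_positions := by
  unfold Claim_changed_admissible_insertion_positions; decide

theorem admissible_insertion_positions_tight : Claim_exact_admissible_insertion_positions := by
  unfold Claim_exact_admissible_insertion_positions
  intro seq _hdom hD
  unfold D_admissible_insertion_positions at hD
  obtain ⟨hne, hneg⟩ := hD
  have hlen0 : seq.length ≠ 0 := by simpa [List.length_eq_zero_iff] using hne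
  obtain ⟨kB, hkB, hBt, _, _, _⟩ := Bst_spec seq hne 0
  intro h
  unfold admissible_insertion_positions admissible_insertion_positions_alt last_position at h
  rw [if_neg hlen0, if_neg hlen0] at h
  simp only [lp_eq_Astate, Astate_allneg seq hneg 0, alt_fold_eq_Bst seq hne, hBt] at h
  have hlast := congrArg List.getLast? h
  simp only [List.getLast?_append, List.getLast?_singleton, Option.some_or,
    Option.some_inj] at hlast
  have := Int.natCast_nonneg kB
  omega
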